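-- pv_equiv track=rewrite | github.com/Koraji95-coder/Suite | backend/domains/project_standards/service.py | _resolve_overall_status
-- ===== SOURCE A (Python) =====
-- from typing import Any, Dict, Optional, Tuple
--
-- def _resolve_overall_status(results: list[Dict[str, Any]]) -> str:
--     statuses = {str(entry.get("status") or "").lower() for entry in results}
--     if "fail" in statuses:
--         return "fail"
--     if "warning" in statuses:
--         return "warning"
--     if "pass" in statuses:
--         return "pass"
--     return "warning"
-- ===== SOURCE B (Python) =====
-- _RANK = {"fail": 3, "warning": 2, "pass": 1}
-- _NAME = ["warning", "pass", "warning", "fail"]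
--
-- def _resolve_overall_status(results):
--     worst = 0
--     for entry in results:
--         worst = max(worst, _RANK.get(str(entry.get("status") or "").lower(), 0))
--     return _NAME[worst]
-- ===== Notes on version B (the rewrite author's own statement) =====
-- stated objective: alternative
-- what changed: B maps each status to a numeric severity rank (fail=3, warning=2, pass=1, other=0), reduces the list by max, and decodes the maximal rank through a lookup table, replacing A's set construction plus three-way priority cascade of membership tests.
import Mathlib
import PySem

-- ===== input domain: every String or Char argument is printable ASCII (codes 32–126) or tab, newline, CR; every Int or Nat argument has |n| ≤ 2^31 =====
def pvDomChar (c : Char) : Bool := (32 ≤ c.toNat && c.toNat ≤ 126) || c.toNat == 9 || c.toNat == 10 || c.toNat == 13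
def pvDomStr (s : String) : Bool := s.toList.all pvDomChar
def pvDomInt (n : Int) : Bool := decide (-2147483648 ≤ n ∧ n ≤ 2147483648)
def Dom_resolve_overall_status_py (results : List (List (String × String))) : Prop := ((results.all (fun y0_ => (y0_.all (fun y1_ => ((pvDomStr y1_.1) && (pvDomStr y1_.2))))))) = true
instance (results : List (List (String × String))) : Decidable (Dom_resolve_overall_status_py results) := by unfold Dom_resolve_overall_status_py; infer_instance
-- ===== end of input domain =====

-- B replaces A's set comprehension + three membership tests by a max-reduce over numeric severity ranks decoded through a table (alternative decomposition).


-- shared helper: str(entry.get("status") or "").lower() — both Pythons compute this per entry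
def pvStatus (entry : List (String × String)) : String :=
  let v : String :=
    match List.lookup "status" entry with  -- dict.get: first match in the association list
    | none => ""
    | some s => if s = "" then "" else s   -- Python 'or ""' on a string: empty is falsy
  PySem.Str.lower v

-- ===== PORT A =====
def resolve_overall_status_py (results : List (List (String × String))) : String :=
  let statuses : PySem.Set String := PySem.Set.ofList (results.map pvStatus)
  if PySem.Set.contains statuses "fail" then "fail"
  else if PySem.Set.contains statuses "warning" then "warning"
  else if PySem.Set.contains statuses "pass" then "pass"
  else "warning"

-- ===== PORT B =====
-- _RANK.get(s, 0): constant dict lookup, ported as a match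
def pvRank (entry : List (String × String)) : Nat :=
  match pvStatus entry with
  | "fail" => 3
  | "warning" => 2
  | "pass" => 1
  | _ => 0

def resolve_overall_status_py_alt (results : List (List (String × String))) : String :=
  let worst := results.foldl (fun acc entry => max acc (pvRank entry)) 0
  -- _NAME[worst]: worst ≤ 3 always, so the plain index is in range
  (["warning", "pass", "warning", "fail"].getD worst "warning")

-- ===== PRECONDITION & SPEC =====
def Spec_resolve_overall_status_py (results : List (List (String × String))) (out : String) : Prop := out = resolve_overall_status_py_alt results
instance (results : List (List (String × String))) (out : String) : Decidable (Spec_resolve_overall_status_py results out) := by unfold Spec_resolve_overall_status_py; infer_instance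

-- ===== CLAIM =====
def Claim_equal_resolve_overall_status_py : Prop := ∀ (results : List (List (String × String))), Dom_resolve_overall_status_py results → Spec_resolve_overall_status_py results (resolve_overall_status_py results)

-- ===== LEMMAS AND PROOFS =====
-- the cascade value the max of ranks must equal
def pvCascade (results : List (List (String × String))) : Nat :=
  if results.any (fun e => pvStatus e == "fail") then 3
  else if results.any (fun e => pvStatus e == "warning") then 2
  else if results.any (fun e => pvStatus e == "pass") then 1
  else 0

theorem pvRank_eq (h : List (String × String)) :
    pvRank h = if pvStatus h = "fail" then 3
      else if pvStatus h = "warning" then 2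
      else if pvStatus h = "pass" then 1 else 0 := by
  unfold pvRank; split <;> split_ifs <;> simp_all

theorem pv_rank_cascade (h : List (String × String)) (t : List (List (String × String))) :
    max (pvRank h) (pvCascade t) = pvCascade (h :: t) := by
  rw [pvRank_eq]
  unfold pvCascade
  simp only [List.any_cons]
  by_cases hf : pvStatus h = "fail" <;> by_cases hw : pvStatus h = "warning" <;>
    by_cases hp : pvStatus h = "pass" <;>
      simp_all <;> split_ifs <;> omega

theorem pv_fold_max (results : List (List (String × String))) (a : Nat) :
    results.foldl (fun acc entry => max acc (pvRank entry)) a = max a (pvCascade results) := by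
  induction results generalizing a with
  | nil => simp [pvCascade]
  | cons h t ih =>
    simp only [List.foldl, ih, ← pv_rank_cascade, Nat.max_assoc]

theorem pv_contains_ofList_map (results : List (List (String × String))) (x : String) :
    PySem.Set.contains (PySem.Set.ofList (results.map pvStatus)) x
    = results.any (fun e => pvStatus e == x) := by
  rw [Bool.eq_iff_iff, PySem.Set.contains_iff, PySem.Set.mem_ofList]
  simp only [List.mem_map, List.any_eq_true, beq_iff_eq]

-- ===== VERDICT =====
theorem resolve_overall_status_py_spec : Claim_equal_resolve_overall_status_py := by
  intro results _
  unfold Spec_resolve_overall_status_py resolve_overall_status_py resolve_overall_status_py_alt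
  rw [pv_fold_max]
  simp only [pv_contains_ofList_map, Nat.zero_max]
  unfold pvCascade
  split_ifs <;> rfl
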